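-- pv_equiv track=rewrite | github.com/davipatti/aoc2024 | day-09/main.py | group_nones
-- ===== SOURCE A (Python) =====
-- def group_nones(queue):
--     """
--     Combine multiple blocks that just contain None into single blocks.
--     """
--     cleaned = []
--     append = cleaned.append
--     n = 0
--     for block in queue:
--         if block and block[0] is not None:
--             if n != 0:
--                 append([None] * n)
--                 n = 0
--             append(block)
--         else:
--             n += len(block)
--     if n != 0:
--         append([None] * n)
--     return cleaned
-- ===== SOURCE B (Python) =====
-- def group_nones(queue):
--     """
--     Combine multiple blocks that just contain None into single blocks.
--     Recursive decomposition: peel off data blocks one at a time; on a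
--     non-data block, swallow the whole maximal run of non-data blocks at
--     once and emit a single [None]*total (skipped if total == 0).
--     """
--     def is_data(b):
--         return bool(b) and b[0] is not None
--
--     def go(q):
--         if not q:
--             return []
--         if is_data(q[0]):
--             return [q[0]] + go(q[1:])
--         i, total = 0, 0
--         while i < len(q) and not is_data(q[i]):
--             total += len(q[i])
--             i += 1
--         tail = go(q[i:])
--         return ([[None] * total] + tail) if total else tail
--
--     return go(queue)
-- ===== Notes on version B (the rewrite author's own statement) =====
-- stated objective: alternative
-- what changed: A's single pass with a pending-None counter flushed on each transition is replaced by a recursive decomposition that emits data blocks directly and consumes each maximal run of None-only/empty blocks in one step, emitting one merged block per run.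
import Mathlib
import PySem

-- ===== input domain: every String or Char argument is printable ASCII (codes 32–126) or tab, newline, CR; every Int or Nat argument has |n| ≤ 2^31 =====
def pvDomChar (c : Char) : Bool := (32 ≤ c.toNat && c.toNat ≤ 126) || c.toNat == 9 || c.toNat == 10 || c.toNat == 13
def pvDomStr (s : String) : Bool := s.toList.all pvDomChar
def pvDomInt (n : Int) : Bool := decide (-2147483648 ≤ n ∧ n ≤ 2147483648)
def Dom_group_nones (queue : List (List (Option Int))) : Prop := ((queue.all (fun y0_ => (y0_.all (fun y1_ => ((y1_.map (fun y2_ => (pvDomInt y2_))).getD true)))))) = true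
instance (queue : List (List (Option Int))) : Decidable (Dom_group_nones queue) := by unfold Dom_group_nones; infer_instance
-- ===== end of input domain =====

-- B restructures A's pending-None counter pass into a recursion that consumes each
-- maximal run of None-only/empty blocks in one step (objective: alternative, same cost).

-- ===== PORT A =====
-- `block and block[0] is not None`
def isDataA (b : List (Option Int)) : Bool :=
  match b with
  | [] => false
  | x :: _ => x.isSome

-- A's for-loop over state (cleaned, n), plus the final flush on the empty case
def aloop : List (List (Option Int)) → List (List (Option Int)) → Nat → List (List (Option Int))
  | [], cleaned, n => cleaned ++ (if n ≠ 0 then [List.replicate n (none : Option Int)] else [])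
  | block :: rest, cleaned, n =>
    if isDataA block then
      aloop rest ((cleaned ++ (if n ≠ 0 then [List.replicate n (none : Option Int)] else [])) ++ [block]) 0
    else
      aloop rest cleaned (n + block.length)

def group_nones (queue : List (List (Option Int))) : List (List (Option Int)) :=
  aloop queue [] 0

-- ===== PORT B =====
def isDataB (b : List (Option Int)) : Bool :=
  match b with
  | [] => false
  | x :: _ => x.isSome

-- B's `go`: the inner while-scan for the maximal non-data run is takeWhile/dropWhile
def goB : List (List (Option Int)) → List (List (Option Int))
  | [] => []
  | b :: rest =>
    if isDataB b then b :: goB rest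
    else
      let run := rest.takeWhile (fun x => !isDataB x)
      let rest' := rest.dropWhile (fun x => !isDataB x)
      let total := b.length + (run.map List.length).sum
      let tail := goB rest'
      if total ≠ 0 then List.replicate total (none : Option Int) :: tail else tail
termination_by q => q.length
decreasing_by
  · simp
  · have := List.length_dropWhile_le (fun x => !isDataB x) rest
    simp
    omega

def group_nones_alt (queue : List (List (Option Int))) : List (List (Option Int)) :=
  goB queue

-- ===== PRECONDITION & SPEC =====
def Spec_group_nones (queue : List (List (Option Int))) (out : List (List (Option Int))) : Prop := out = group_nones_alt queue
instance (queue : List (List (Option Int))) (out : List (List (Option Int))) : Decidable (Spec_group_nones queue out) := by unfold Spec_group_nones; infer_instance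

-- ===== CLAIM (what is proved, stated in full; the proofs are below) =====
def Claim_equal_group_nones : Prop := ∀ (queue : List (List (Option Int))), Dom_group_nones queue → Spec_group_nones queue (group_nones queue)

-- ===== LEMMAS AND PROOFS =====

-- proof-only characterisation of A's loop: result after the prefix `cleaned`, with n pending Nones
def goN : Nat → List (List (Option Int)) → List (List (Option Int))
  | n, [] => if n ≠ 0 then [List.replicate n (none : Option Int)] else []
  | n, b :: rest =>
    if isDataA b then
      (if n ≠ 0 then [List.replicate n (none : Option Int)] else []) ++ b :: goN 0 rest
    else goN (n + b.length) rest

theorem aloop_eq_goN (q : List (List (Option Int))) :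
    ∀ cleaned n, aloop q cleaned n = cleaned ++ goN n q := by
  induction q with
  | nil => intro cleaned n; simp [aloop, goN]
  | cons b rest ih =>
    intro cleaned n
    by_cases h : isDataA b
    · simp [aloop, goN, h, ih]
    · simp [aloop, goN, h, ih]

theorem isDataAB (b : List (Option Int)) : isDataA b = isDataB b := by
  cases b <;> rfl

theorem goN_run (run : List (List (Option Int))) :
    ∀ n rest', (∀ b ∈ run, isDataA b = false) →
      goN n (run ++ rest') = goN (n + (run.map List.length).sum) rest' := by
  induction run with
  | nil => intro n rest' _; simp
  | cons b rs ih =>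
    intro n rest' h
    have hb : isDataA b = false := h b (by simp)
    simp only [List.cons_append, goN, hb, Bool.false_eq_true, if_false]
    rw [ih _ _ (fun x hx => h x (by simp [hx]))]
    simp only [List.map_cons, List.sum_cons]
    ring_nf

theorem goN_zero_eq_goB_bounded : ∀ (N : Nat) (q : List (List (Option Int))), q.length ≤ N → goN 0 q = goB q := by
  intro N
  induction N with
  | zero =>
    intro q h
    have : q = [] := List.eq_nil_of_length_eq_zero (Nat.le_zero.mp h)
    subst this; simp [goN, goB]
  | succ N IH =>
    intro q h
    cases q with
    | nil => simp [goN, goB]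
    | cons b rest =>
      have hlen : rest.length ≤ N := by simpa using h
      by_cases hb : isDataB b
      · have hA : isDataA b = true := by rw [isDataAB]; exact hb
        simp [goN, goB, hA, hb, IH rest hlen]
      · have hA : isDataA b = false := by rw [isDataAB]; simpa using hb
        set run := rest.takeWhile (fun x => !isDataB x) with hrun_def
        set rest' := rest.dropWhile (fun x => !isDataB x) with hrest'_def
        set total := b.length + (run.map List.length).sum with htotal_def
        have hrest : run ++ rest' = rest := List.takeWhile_append_dropWhile
        have hrun : ∀ x ∈ run, isDataA x = false := by
          intro x hx
          have := List.mem_takeWhile_imp hx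
          simpa [isDataAB] using this
        have h1 : goN 0 (b :: rest) = goN total rest' := by
          simp only [goN, hA, Bool.false_eq_true, if_false]
          rw [← hrest, goN_run run _ _ hrun]
          norm_num [htotal_def]
        have h2 : goN total rest' =
            (if total ≠ 0 then [List.replicate total (none : Option Int)] else []) ++ goB rest' := by
          cases hr : rest' with
          | nil => simp [goN, goB]
          | cons d r =>
            have hd : isDataB d = true := by
              have hh := List.head?_dropWhile_not (fun x => !isDataB x) rest
              rw [← hrest'_def, hr] at hh
              simpa using hh
            have hdA : isDataA d = true := by rw [isDataAB]; exact hd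
            have hrlen : r.length ≤ N := by
              have h1 : rest'.length ≤ rest.length := by
                rw [hrest'_def]; exact List.length_dropWhile_le _ _
              rw [hr] at h1; simp at h1; omega
            have ihr : goN 0 r = goB r := IH r hrlen
            simp [goN, hdA, goB, hd, ihr]
        rw [h1, h2]
        have h3 : goB (b :: rest) =
            (if total ≠ 0 then [List.replicate total (none : Option Int)] else []) ++ goB rest' := by
          simp only [goB, hb, Bool.false_eq_true, if_false, ← hrun_def, ← hrest'_def, ← htotal_def]
          by_cases ht : total = 0 <;> simp [ht]
        rw [h3]

theorem goN_zero_eq_goB (q : List (List (Option Int))) : goN 0 q = goB q :=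
  goN_zero_eq_goB_bounded q.length q le_rfl

-- ===== VERDICT (by name: the statement is the Claim_ definition above) =====
theorem group_nones_spec : Claim_equal_group_nones := by
  intro queue _
  show group_nones queue = group_nones_alt queue
  rw [group_nones, group_nones_alt, aloop_eq_goN, goN_zero_eq_goB]
  simp
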